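-- pv_equiv track=rewrite | github.com/askanna-io/askanna-backend | askanna_backend/core/utils/utils.py | get_all_directories
-- ===== SOURCE A (Python) =====
-- def get_all_directories(paths: list) -> list:
--     """
--     Get a list of all directories from a list of paths. By unwinding the paths we make sure that all (sub)directories
--     are available in the list of directories we return.
--     """
--
--     directories = []
--     for path in paths:
--         directories.append(path)
--
--         path_parts = path.split("/")
--         while len(path_parts) > 1:
--             path_parts = path_parts[: len(path_parts) - 1]
--             path = "/".join(path_parts)
--             if path and path != "/":
--                 directories.append(path)
--
--     directories = sorted(list(set(directories) - {"/"} - {""}))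
--
--     return directories
-- ===== SOURCE B (Python) =====
-- def get_all_directories(paths: list) -> list:
--     """
--     Get a list of all directories from a list of paths: one forward pass per path
--     that grows a running prefix over the path's parts, collecting into a set.
--     """
--     found = set()
--     for path in paths:
--         found.add(path)
--         prefix = None
--         for part in path.split("/")[:-1]:
--             prefix = part if prefix is None else prefix + "/" + part
--             found.add(prefix)
--     return sorted(found - {"", "/"})
-- ===== Notes on version B (the rewrite author's own statement) =====
-- stated objective: simpler
-- what changed: A unwinds each path from the end with a while loop that repeatedly slices the parts list and re-joins it, filtering both during the loop and at the end; B makes one forward pass per path growing a running prefix string over the parts and adding each prefix to a set, filtering only once at the end.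
import Mathlib
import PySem

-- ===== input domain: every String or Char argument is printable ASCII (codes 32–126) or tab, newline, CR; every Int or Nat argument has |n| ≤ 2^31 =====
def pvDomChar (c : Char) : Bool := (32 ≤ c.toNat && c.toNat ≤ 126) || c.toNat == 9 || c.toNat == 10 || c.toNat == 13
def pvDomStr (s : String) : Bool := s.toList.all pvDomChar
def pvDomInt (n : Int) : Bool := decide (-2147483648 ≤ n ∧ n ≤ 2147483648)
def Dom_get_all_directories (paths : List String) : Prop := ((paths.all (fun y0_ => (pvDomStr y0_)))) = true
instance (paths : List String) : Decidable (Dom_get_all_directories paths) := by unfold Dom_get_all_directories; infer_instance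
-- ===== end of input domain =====

-- B replaces A's shrink-from-the-end while loop (re-joining a shortened parts list each step,
-- filtering twice) by one forward pass per path growing a running prefix into a set; objective:
-- simpler, same asymptotic cost.

-- shared primitive: path.split("/") — the separator "/" is nonempty, so split? is always `some`
def splitSlash (s : String) : List String := (PySem.Str.split? s "/").getD []

-- ===== PORT A =====
-- A's while loop: drop the last part, re-join, append when neither '' nor '/'
def getAllDirsUnwind (path_parts : List String) (path : String) (directories : List String) : List String :=
  if _h : path_parts.length > 1 then
    let parts' := PySem.List.slice path_parts none (some ((path_parts.length : Int) - 1))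
    let path' := PySem.Str.join "/" parts'
    let directories' := if path' ≠ "" ∧ path' ≠ "/" then directories ++ [path'] else directories
    getAllDirsUnwind parts' path' directories'
  else directories
termination_by path_parts.length
decreasing_by
  rw [PySem.List.slice_to _ (by omega : (0:Int) ≤ (path_parts.length : Int) - 1)]
  simp only [List.length_take]
  omega

def gadStepA (directories : List String) (path : String) : List String :=
  getAllDirsUnwind (splitSlash path) path (directories ++ [path])

def get_all_directories (paths : List String) : List String :=
  let directories := paths.foldl gadStepA []
  PySem.List.sorted (PySem.Set.diff (PySem.Set.diff (PySem.Set.ofList directories) ["/"]) [""]) (fun x => x) false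

-- ===== PORT B =====
-- B's inner loop body: grow the running prefix and add it to the set
def gadAltStep (st : PySem.Set String × Option String) (part : String) : PySem.Set String × Option String :=
  let pre : String := match st.2 with
    | none => part
    | some p => p ++ "/" ++ part
  (PySem.Set.add st.1 pre, some pre)

def gadStepB (found : PySem.Set String) (path : String) : PySem.Set String :=
  ((PySem.List.slice (splitSlash path) none (some (-1))).foldl gadAltStep
    (PySem.Set.add found path, none)).1

def get_all_directories_alt (paths : List String) : List String :=
  let found := paths.foldl gadStepB (PySem.Set.empty : PySem.Set String)
  PySem.List.sorted (PySem.Set.diff found ["", "/"]) (fun x => x) false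

-- ===== PRECONDITION & SPEC =====
def Spec_get_all_directories (paths : List String) (out : List String) : Prop := out = get_all_directories_alt paths
instance (paths : List String) (out : List String) : Decidable (Spec_get_all_directories paths out) := by unfold Spec_get_all_directories; infer_instance

-- ===== CLAIM (what is proved, stated in full; the proofs are below) =====
def Claim_equal_get_all_directories : Prop := ∀ (paths : List String), Dom_get_all_directories paths → Spec_get_all_directories paths (get_all_directories paths)

-- ===== LEMMAS AND PROOFS =====

-- String-level facts about '/'.join
theorem strJoin_singleton (a : String) : PySem.Str.join "/" [a] = a := by
  rw [← String.toList_inj]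
  simp [PySem.Str.toList_join, PySem.Chars.join_singleton]

theorem strJoin_cons (a : String) (l : List String) (h : l ≠ []) :
    PySem.Str.join "/" (a :: l) = a ++ "/" ++ PySem.Str.join "/" l := by
  obtain ⟨b, t, rfl⟩ : ∃ b t, l = b :: t := by
    cases l with
    | nil => exact absurd rfl h
    | cons b t => exact ⟨b, t, rfl⟩
  rw [← String.toList_inj]
  simp [PySem.Str.toList_join, PySem.Chars.join_cons_cons, String.toList_append]

-- membership through A's while loop
theorem mem_unwind (n : Nat) (ps : List String) (hn : ps.length = n) (path : String)
    (acc : List String) (x : String) :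
    x ∈ getAllDirsUnwind ps path acc ↔
      x ∈ acc ∨ ∃ k, 1 ≤ k ∧ k < ps.length ∧ x = PySem.Str.join "/" (ps.take k) ∧ x ≠ "" ∧ x ≠ "/" := by
  induction n using Nat.strong_induction_on generalizing ps path acc with
  | _ n ih =>
    rw [getAllDirsUnwind.eq_def]
    by_cases h : ps.length > 1
    · simp only [dif_pos h]
      rw [PySem.List.slice_to _ (by omega : (0:Int) ≤ (ps.length : Int) - 1)]
      have htn : ((ps.length : Int) - 1).toNat = ps.length - 1 := by omega
      rw [htn]
      rw [ih (ps.length - 1) (by omega) _ (by simp) _ _]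
      have hlen : (ps.take (ps.length - 1)).length = ps.length - 1 := by simp
      constructor
      · rintro (hx | ⟨k, hk1, hk2, hkx, hne, hns⟩)
        · -- came from acc' = acc (++ maybe the new join)
          split_ifs at hx with hcond
          · rcases List.mem_append.mp hx with hx | hx
            · exact Or.inl hx
            · refine Or.inr ⟨ps.length - 1, by omega, by omega, ?_, ?_, ?_⟩
              · simpa using List.mem_singleton.mp hx
              · simp only [List.mem_singleton] at hx; subst hx; exact hcond.1
              · simp only [List.mem_singleton] at hx; subst hx; exact hcond.2
          · exact Or.inl hx
        · refine Or.inr ⟨k, hk1, by omega, ?_, hne, hns⟩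
          rw [List.take_take] at hkx
          have hmin : min k (ps.length - 1) = k := by omega
          rw [hmin] at hkx
          exact hkx
      · rintro (hx | ⟨k, hk1, hk2, hkx, hne, hns⟩)
        · left; split_ifs <;> simp [hx]
        · by_cases hk : k = ps.length - 1
          · subst hk
            left
            have : x = PySem.Str.join "/" (ps.take (ps.length - 1)) := hkx
            split_ifs with hcond
            · simp [this]
            · rw [this] at hne hns
              exact absurd ⟨hne, hns⟩ hcond
          · refine Or.inr ⟨k, hk1, by omega, ?_, hne, hns⟩
            rw [List.take_take]
            have hmin : min k (ps.length - 1) = k := by omega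
            rw [hmin]
            exact hkx
    · simp only [dif_neg h]
      constructor
      · exact Or.inl
      · rintro (hx | ⟨k, hk1, hk2, _⟩)
        · exact hx
        · omega

-- jp p? l: the prefix string B has built after consuming l (continuing from p?)
def jp (p? : Option String) (l : List String) : String :=
  match p? with
  | none => PySem.Str.join "/" l
  | some p => p ++ "/" ++ PySem.Str.join "/" l

theorem jp_singleton (p? : Option String) (q : String) :
    jp p? [q] = (match p? with | none => q | some p => p ++ "/" ++ q) := by
  cases p? <;> simp [jp, strJoin_singleton]

theorem jp_cons (p? : Option String) (q : String) (l : List String) (h : l ≠ []) :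
    jp p? (q :: l) = jp (some (jp p? [q])) l := by
  cases p? with
  | none => simp [jp, strJoin_singleton, strJoin_cons q l h]
  | some p => simp [jp, strJoin_singleton, strJoin_cons q l h, String.append_assoc]

-- membership through B's inner fold
theorem mem_foldB (qs : List String) (s : PySem.Set String) (p? : Option String) (x : String) :
    x ∈ (qs.foldl gadAltStep (s, p?)).1 ↔
      x ∈ s ∨ ∃ k, k < qs.length ∧ x = jp p? (qs.take (k + 1)) := by
  induction qs generalizing s p? with
  | nil => simp
  | cons q t ih =>
    have hstep : gadAltStep (s, p?) q =
        (PySem.Set.add s (jp p? [q]), some (jp p? [q])) := by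
      cases p? <;> simp [gadAltStep, jp_singleton]
    rw [List.foldl_cons, hstep, ih]
    constructor
    · rintro (hx | ⟨k, hk, hkx⟩)
      · rcases (PySem.Set.mem_add s (jp p? [q]) x).mp hx with hx | hx
        · exact Or.inl hx
        · exact Or.inr ⟨0, by simp, by simpa using hx⟩
      · refine Or.inr ⟨k + 1, by simpa using hk, ?_⟩
        have htne : t.take (k + 1) ≠ [] := by
          apply List.ne_nil_of_length_pos; simp; omega
        rw [List.take_succ_cons, jp_cons p? q (t.take (k+1)) htne]
        exact hkx
    · rintro (hx | ⟨k, hk, hkx⟩)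
      · exact Or.inl ((PySem.Set.mem_add s (jp p? [q]) x).mpr (Or.inl hx))
      · cases k with
        | zero => exact Or.inl ((PySem.Set.mem_add s (jp p? [q]) x).mpr (Or.inr (by simpa using hkx)))
        | succ k =>
          have hk' : k < t.length := by simpa using hk
          have htne : t.take (k + 1) ≠ [] := by
            apply List.ne_nil_of_length_pos; simp; omega
          refine Or.inr ⟨k, hk', ?_⟩
          rw [List.take_succ_cons, jp_cons p? q (t.take (k+1)) htne] at hkx
          exact hkx

-- the per-path contribution, unfiltered
def PPref (path x : String) : Prop :=
  x = path ∨ ∃ k, 1 ≤ k ∧ k < (splitSlash path).length ∧ x = PySem.Str.join "/" ((splitSlash path).take k)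

theorem mem_stepA (acc : List String) (path x : String) :
    x ∈ gadStepA acc path ↔
      x ∈ acc ∨ (x = path ∨ ∃ k, 1 ≤ k ∧ k < (splitSlash path).length ∧
        x = PySem.Str.join "/" ((splitSlash path).take k) ∧ x ≠ "" ∧ x ≠ "/") := by
  rw [gadStepA, mem_unwind (splitSlash path).length _ rfl]
  simp [or_assoc]

theorem mem_stepB (found : PySem.Set String) (path x : String) :
    x ∈ gadStepB found path ↔ x ∈ found ∨ PPref path x := by
  rw [gadStepB, PySem.List.slice_to_neg_one, mem_foldB]
  rw [PySem.Set.mem_add]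
  unfold PPref
  constructor
  · rintro ((hx | hx) | ⟨k, hk, hkx⟩)
    · exact Or.inl hx
    · exact Or.inr (Or.inl hx)
    · refine Or.inr (Or.inr ⟨k + 1, by omega, ?_, ?_⟩)
      · have := (splitSlash path).length_dropLast
        omega
      · have hk' : k < (splitSlash path).length - 1 := by
          have := (splitSlash path).length_dropLast
          omega
        rw [jp, List.dropLast_eq_take, List.take_take] at hkx
        have hmin : min (k + 1) ((splitSlash path).length - 1) = k + 1 := by omega
        rw [hmin] at hkx
        exact hkx
  · rintro (hx | (hx | ⟨k, hk1, hk2, hkx⟩))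
    · exact Or.inl (Or.inl hx)
    · exact Or.inl (Or.inr hx)
    · refine Or.inr ⟨k - 1, ?_, ?_⟩
      · have := (splitSlash path).length_dropLast
        omega
      · rw [jp, List.dropLast_eq_take, List.take_take]
        have hmin : min (k - 1 + 1) ((splitSlash path).length - 1) = k := by omega
        rw [hmin]
        exact hkx

theorem mem_dirsA (paths : List String) (acc : List String) (x : String) :
    x ∈ paths.foldl gadStepA acc ↔
      x ∈ acc ∨ ∃ p ∈ paths, (x = p ∨ ∃ k, 1 ≤ k ∧ k < (splitSlash p).length ∧
        x = PySem.Str.join "/" ((splitSlash p).take k) ∧ x ≠ "" ∧ x ≠ "/") := by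
  induction paths generalizing acc with
  | nil => simp
  | cons p t ih =>
    rw [List.foldl_cons, ih, mem_stepA]
    simp [or_assoc]

theorem mem_foundB (paths : List String) (s : PySem.Set String) (x : String) :
    x ∈ paths.foldl gadStepB s ↔ x ∈ s ∨ ∃ p ∈ paths, PPref p x := by
  induction paths generalizing s with
  | nil => simp
  | cons p t ih =>
    rw [List.foldl_cons, ih, mem_stepB]
    simp [or_assoc]

theorem nodup_foundB (paths : List String) (s : PySem.Set String) (hs : s.Nodup) :
    (paths.foldl gadStepB s).Nodup := by
  induction paths generalizing s with
  | nil => exact hs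
  | cons p t ih =>
    refine ih _ ?_
    rw [gadStepB]
    generalize PySem.List.slice (splitSlash p) none (some (-1)) = qs
    have base : (PySem.Set.add s p).Nodup := PySem.Set.nodup_add s p hs
    generalize hst : (PySem.Set.add s p, (none : Option String)) = st at *
    have hb : st.1.Nodup := by rw [← hst]; exact base
    clear hst base
    induction qs generalizing st with
    | nil => exact hb
    | cons q u ihq =>
      rw [List.foldl_cons]
      exact ihq _ (by cases st with | mk a b => cases b <;> exact PySem.Set.nodup_add _ _ hb)

-- ===== VERDICT (by name: the statement is the Claim_ definition above) =====
theorem get_all_directories_spec : Claim_equal_get_all_directories := by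
  intro paths _
  unfold Spec_get_all_directories get_all_directories get_all_directories_alt
  apply PySem.List.sorted_eq_sorted_of_perm _ _ _ (fun a b h => h)
  rw [PySem.Set.empty_eq]
  rw [List.perm_ext_iff_of_nodup
    (PySem.Set.nodup_diff _ _ (PySem.Set.nodup_diff _ _ (PySem.Set.nodup_ofList _)))
    (PySem.Set.nodup_diff _ _ (nodup_foundB paths _ List.nodup_nil))]
  intro a
  simp only [PySem.Set.mem_diff, PySem.Set.mem_ofList, mem_dirsA, mem_foundB, PPref,
    List.mem_cons, List.not_mem_nil, false_or, or_false]
  constructor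
  · rintro ⟨⟨⟨p, hp, hx⟩, hns⟩, hne⟩
    refine ⟨⟨p, hp, ?_⟩, by push Not; exact ⟨hne, hns⟩⟩
    rcases hx with hx | ⟨k, h1, h2, h3, _, _⟩
    · exact Or.inl hx
    · exact Or.inr ⟨k, h1, h2, h3⟩
  · rintro ⟨⟨p, hp, hx⟩, hno⟩
    push Not at hno
    refine ⟨⟨⟨p, hp, ?_⟩, hno.2⟩, hno.1⟩
    rcases hx with hx | ⟨k, h1, h2, h3⟩
    · exact Or.inl hx
    · exact Or.inr ⟨k, h1, h2, h3, hno.1, hno.2⟩
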